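-- pv_equiv track=rewrite | github.com/Sirin-890/codeforces | BJM_176_div2_d.py | min_cost_to_equal
-- ===== SOURCE A (Python) =====
-- def min_cost_to_equal(x, y):
--     if x == y:
--         return 0
--
--     cost = 0
--     used_powers = set()
--
--     def apply_operations(a):
--         local_cost = 0
--         while a:
--             k = a & -a  # Get lowest power of 2
--             if k not in used_powers:
--                 used_powers.add(k)
--                 local_cost += k
--             a //= 2  # Move up the binary tree
--         return local_cost
--
--     cost += apply_operations(x)
--     cost += apply_operations(y)
--
--     return cost
-- ===== SOURCE B (Python) =====
-- def _lowbit_exp(a):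
--     """Exponent of the lowest set bit of a (a > 1 even or odd)."""
--     c = 0
--     while a % 2 == 0:
--         a //= 2
--         c += 1
--     return c
--
--
-- def _depth(a):
--     """Characteristic exponent D of a: the distinct powers collected while
--     halving a are exactly 2^0 .. 2^D.  Returns -1 for a == 0."""
--     if a == 0:
--         return -1
--     d = 0
--     while a > 1:
--         d = max(d, _lowbit_exp(a))
--         a //= 2
--     return d
--
--
-- def min_cost_to_equal(x, y):
--     if x == y:
--         return 0
--     return 2 ** (max(_depth(x), _depth(y)) + 1) - 1
-- ===== Notes on version B (the rewrite author's own statement) =====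
-- stated objective: simpler
-- what changed: A sums the lowest set bits over halvings of both arguments through a shared mutable set of already-used powers; B exploits that the collected powers always form the contiguous prefix 2^0..2^D, computes the characteristic exponent D per argument by one bit scan and returns the closed form 2^(D+1)-1.
import Mathlib
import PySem

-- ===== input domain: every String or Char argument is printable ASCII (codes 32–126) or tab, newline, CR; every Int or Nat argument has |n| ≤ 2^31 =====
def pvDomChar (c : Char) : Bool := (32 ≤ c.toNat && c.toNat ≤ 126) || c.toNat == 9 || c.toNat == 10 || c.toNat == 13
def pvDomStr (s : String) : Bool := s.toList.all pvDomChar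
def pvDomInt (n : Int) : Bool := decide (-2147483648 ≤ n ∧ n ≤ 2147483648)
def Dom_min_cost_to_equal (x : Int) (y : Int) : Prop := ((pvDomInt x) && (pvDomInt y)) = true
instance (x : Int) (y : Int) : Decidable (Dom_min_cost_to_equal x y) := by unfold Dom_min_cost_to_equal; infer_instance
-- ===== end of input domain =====

-- B replaces A's shared mutable set of collected powers by a closed form: the distinct
-- powers collected while halving an argument are always 2^0..2^D for a characteristic
-- exponent D, so B computes D per argument and returns 2^(D+1)-1 (objective: simpler).

-- ===== PORT A =====
-- apply_operations(a) with the shared set 'used_powers' threaded explicitly.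
-- The 'while a' loop is guarded by '0 < a' for totality only: on a < 0 the Python loop
-- never terminates (a //= 2 converges to -1), and such inputs are outside Pre_.
def applyOperations (a : Int) (used : PySem.Set Int) : Int × PySem.Set Int :=
  if _h : 0 < a then
    let k := PySem.Int.band a (-a)
    if PySem.Set.contains used k then
      applyOperations (PySem.Int.floordiv a 2) used
    else
      let r := applyOperations (PySem.Int.floordiv a 2) (PySem.Set.add used k)
      (k + r.1, r.2)
  else
    (0, used)
termination_by a.toNat
decreasing_by
  all_goals
    rw [PySem.Int.floordiv_eq_ediv_of_pos (by omega : (0:Int) < 2)]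
    omega

def min_cost_to_equal (x : Int) (y : Int) : Int :=
  if x = y then 0
  else
    let r1 := applyOperations x PySem.Set.empty
    let r2 := applyOperations y r1.2
    0 + r1.1 + r2.1

-- ===== PORT B =====
-- _lowbit_exp(a): exponent of the lowest set bit, by halving while even.
-- Guarded by 'a ≠ 0' for totality only (the Python loop diverges exactly at a = 0,
-- which B never reaches: _lowbit_exp is only called with a > 1).
def lowbitExp (a : Int) : Int :=
  if h : PySem.Int.mod a 2 = 0 ∧ a ≠ 0 then
    1 + lowbitExp (PySem.Int.floordiv a 2)
  else 0
termination_by a.natAbs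
decreasing_by
  rw [PySem.Int.floordiv_eq_ediv_of_pos (by omega : (0:Int) < 2)]
  rw [PySem.Int.mod_eq_emod_of_pos (by omega : (0:Int) < 2)] at h
  omega

-- _depth(a): the loop 'while a > 1' with accumulator d.
def depthGo (a : Int) (d : Int) : Int :=
  if _h : 1 < a then depthGo (PySem.Int.floordiv a 2) (max d (lowbitExp a)) else d
termination_by a.toNat
decreasing_by
  rw [PySem.Int.floordiv_eq_ediv_of_pos (by omega : (0:Int) < 2)]
  omega

def depth (a : Int) : Int := if a = 0 then -1 else depthGo a 0

def min_cost_to_equal_alt (x : Int) (y : Int) : Int :=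
  if x = y then 0
  else 2 ^ (max (depth x) (depth y) + 1).toNat - 1

-- ===== PRECONDITION & SPEC =====
-- Pre_ excludes exactly the inputs on which Python A never returns: with x ≠ y and a
-- negative argument, apply_operations loops forever (a //= 2 stabilises at -1).
def Pre_min_cost_to_equal (x : Int) (y : Int) : Prop := x = y ∨ (0 ≤ x ∧ 0 ≤ y)
instance (x : Int) (y : Int) : Decidable (Pre_min_cost_to_equal x y) := by
  unfold Pre_min_cost_to_equal; infer_instance

def pvWitness_min_cost_to_equal : Int × Int := (6, 40)

def Spec_min_cost_to_equal (x : Int) (y : Int) (out : Int) : Prop := out = min_cost_to_equal_alt x y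
instance (x : Int) (y : Int) (out : Int) : Decidable (Spec_min_cost_to_equal x y out) := by
  unfold Spec_min_cost_to_equal; infer_instance

-- ===== CLAIM (what is proved, stated in full; the proofs are below) =====
def Claim_equal_min_cost_to_equal : Prop := ∀ (x : Int) (y : Int), Dom_min_cost_to_equal x y → Pre_min_cost_to_equal x y → Spec_min_cost_to_equal x y (min_cost_to_equal x y)

-- ===== LEMMAS AND PROOFS =====

-- 2-adic valuation of n (junk value 0 at n = 0).
def v2 (n : Nat) : Nat :=
  if h : 1 < n ∧ n % 2 = 0 then v2 (n / 2) + 1 else 0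
decreasing_by omega

-- Exponents of the lowbits met while halving n (A collects exactly the powers 2^j, j ∈ expSet n).
def expSet (n : Nat) : Finset Nat :=
  if h : n = 0 then ∅ else insert (v2 n) (expSet (n / 2))
decreasing_by omega

-- Characteristic exponent: expSet n = range (dChar n + 1) for n > 0.
def dChar (n : Nat) : Nat :=
  if h : 1 < n then max (dChar (n / 2)) (v2 n) else 0
decreasing_by omega

theorem v2_odd {n : Nat} (h : n % 2 = 1) : v2 n = 0 := by
  rw [v2]; simp [h]

theorem v2_even {n : Nat} (h0 : 0 < n) (h : n % 2 = 0) : v2 n = v2 (n / 2) + 1 := by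
  rw [v2]; have : 1 < n := by omega
  simp [this, h]

theorem v2_le_dChar {n : Nat} (h : 0 < n) : v2 n ≤ dChar n := by
  rw [dChar]
  by_cases h1 : 1 < n
  · simp [h1]
  · have : n = 1 := by omega
    subst this
    simp [v2]

theorem land_odd_even (m k : Nat) : (2*m+1) &&& (2*k) = 2*(m &&& k) := by
  have := Nat.land_bit true m false k
  simpa [Nat.bit_val] using this

theorem land_even_odd (m k : Nat) : (2*m) &&& (2*k+1) = 2*(m &&& k) := by
  have := Nat.land_bit false m true k
  simpa [Nat.bit_val] using this

-- n & -n is the lowest set bit, on the Nat side: n - (n & (n-1)) = 2^v2(n).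
theorem lowbit_eq (n : Nat) (h : 0 < n) : n - (n &&& (n - 1)) = 2 ^ v2 n := by
  induction n using Nat.strong_induction_on with
  | _ n ih =>
    rcases Nat.even_or_odd n with he | ho
    · obtain ⟨m, hm⟩ := he
      have hm2 : n = 2 * m := by omega
      have hmpos : 0 < m := by omega
      have hn1 : n - 1 = 2*(m-1)+1 := by omega
      have : n &&& (n-1) = 2*(m &&& (m-1)) := by
        rw [hn1, hm2, land_even_odd m (m-1)]
      rw [this, v2_even h (by omega)]
      have hle : m &&& (m-1) ≤ m := Nat.and_le_left
      have ihm := ih m (by omega) hmpos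
      have hdiv : n / 2 = m := by omega
      rw [hdiv]
      have hp : 2 ^ (v2 m + 1) = 2 * 2 ^ (v2 m) := by ring
      omega
    · have hodd : n % 2 = 1 := Nat.odd_iff.mp ho
      obtain ⟨m, hm⟩ := ho
      have h1 : n &&& (n-1) = n - 1 := by
        have : n = 2*m+1 := by omega
        subst this
        have : 2*m+1-1 = 2*m := by omega
        rw [this, land_odd_even m m, Nat.and_self]
      rw [h1, v2_odd hodd]
      omega

-- The Python-exact k = a & -a, for positive a = n.
theorem band_neg_eq_pow (n : Nat) (h : 0 < n) :
    PySem.Int.band (n : Int) (-(n : Int)) = (2 : Int) ^ v2 n := by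
  have h1 : ¬ (0 ≤ -(n:Int)) := by omega
  rw [PySem.Int.band]
  simp only [h1, if_false, Int.toNat_natCast]
  have h2 : (-(-(n:Int)) - 1).toNat = n - 1 := by omega
  rw [h2, lowbit_eq n h, if_pos (Int.natCast_nonneg n)]
  push_cast
  ring

theorem insert_range {j d : Nat} (h : j ≤ d + 1) :
    insert j (Finset.range (d + 1)) = Finset.range (max d j + 1) := by
  ext i
  simp only [Finset.mem_insert, Finset.mem_range]
  omega

-- The exponents collected for n form the contiguous prefix 0..dChar n.
theorem expSet_eq_range (n : Nat) (h : 0 < n) :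
    expSet n = Finset.range (dChar n + 1) := by
  induction n using Nat.strong_induction_on with
  | _ n ih =>
    by_cases h1 : 1 < n
    · have hpos : 0 < n / 2 := by omega
      rw [expSet]
      rw [dif_neg (by omega : ¬ n = 0)]
      rw [ih (n/2) (by omega) hpos]
      have hv : v2 n ≤ dChar (n / 2) + 1 := by
        rcases Nat.even_or_odd n with he | ho
        · rw [v2_even h (Nat.even_iff.mp he)]
          exact Nat.succ_le_succ (v2_le_dChar hpos)
        · rw [v2_odd (Nat.odd_iff.mp ho)]; omega
      rw [insert_range hv]
      conv_rhs => rw [dChar, dif_pos h1]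
    · have : n = 1 := by omega
      subst this
      rw [expSet]; norm_num
      rw [expSet]; norm_num
      rw [dChar]; norm_num
      rw [v2]; norm_num

theorem pow_two_inj {i j : Nat} (h : (2:Int)^i = 2^j) : i = j := by
  have h2 : (2:Nat)^i = 2^j := by exact_mod_cast h
  exact Nat.pow_right_injective (le_refl 2) h2

-- Full functional specification of A's loop: the cost is the sum of the not-yet-used
-- powers 2^j, j ∈ expSet n, and the set is extended by exactly those powers.
theorem applyOps_spec (n : Nat) (U : PySem.Set Int) :
    (applyOperations (n : Int) U).1
      = ∑ j ∈ (expSet n).filter (fun j => ¬ ((2:Int) ^ j ∈ U)), (2:Int) ^ j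
    ∧ ∀ z : Int, z ∈ (applyOperations (n : Int) U).2 ↔ z ∈ U ∨ ∃ j ∈ expSet n, z = (2:Int) ^ j := by
  induction n using Nat.strong_induction_on generalizing U with
  | _ n ih =>
    by_cases h0 : n = 0
    · subst h0
      rw [applyOperations, dif_neg (by norm_num), expSet, dif_pos rfl]
      simp
    · have hpos : (0:Int) < n := by exact_mod_cast Nat.pos_of_ne_zero h0
      have hk : PySem.Int.band (n : Int) (-(n : Int)) = (2:Int) ^ v2 n :=
        band_neg_eq_pow n (Nat.pos_of_ne_zero h0)
      have hf : PySem.Int.floordiv (n:Int) 2 = ((n / 2 : Nat) : Int) := by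
        exact_mod_cast PySem.Int.floordiv_natCast n 2
      have hE : expSet n = insert (v2 n) (expSet (n / 2)) := by
        rw [expSet, dif_neg h0]
      rw [applyOperations, dif_pos hpos]
      simp only [hk, hf, hE]
      obtain ⟨ihc, ihm⟩ := ih (n / 2) (by omega) U
      obtain ⟨ihc', ihm'⟩ := ih (n / 2) (by omega) (PySem.Set.add U ((2:Int) ^ v2 n))
      by_cases hmem : (2:Int) ^ v2 n ∈ U
      · rw [if_pos ((PySem.Set.contains_iff U _).mpr hmem)]
        constructor
        · rw [ihc, Finset.filter_insert, if_neg (by simpa using hmem)]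
        · intro z
          rw [ihm z]
          constructor
          · rintro (hz | ⟨j, hj, rfl⟩)
            · exact Or.inl hz
            · exact Or.inr ⟨j, Finset.mem_insert_of_mem hj, rfl⟩
          · rintro (hz | ⟨j, hj, rfl⟩)
            · exact Or.inl hz
            · rcases Finset.mem_insert.mp hj with rfl | hj'
              · exact Or.inl hmem
              · exact Or.inr ⟨j, hj', rfl⟩
      · rw [if_neg (by simpa [PySem.Set.contains_iff] using hmem)]
        constructor
        · simp only []
          rw [ihc']
          have hfilter : (expSet (n/2)).filter
                (fun j => ¬ ((2:Int) ^ j ∈ PySem.Set.add U ((2:Int) ^ v2 n)))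
              = ((expSet (n/2)).filter (fun j => ¬ ((2:Int) ^ j ∈ U))).erase (v2 n) := by
            ext j
            simp only [Finset.mem_filter, Finset.mem_erase, PySem.Set.mem_add]
            constructor
            · rintro ⟨hj, hnot⟩
              exact ⟨fun hjv => hnot (Or.inr (by rw [hjv])), hj, fun hU => hnot (Or.inl hU)⟩
            · rintro ⟨hne, hj, hnot⟩
              refine ⟨hj, ?_⟩
              rintro (hU | heq)
              · exact hnot hU
              · exact hne (pow_two_inj heq)
          rw [hfilter]
          rw [Finset.filter_insert, if_pos (by simpa using hmem)]
          have hins : insert (v2 n) ((expSet (n/2)).filter (fun j => ¬ ((2:Int)^j ∈ U)))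
              = insert (v2 n) (((expSet (n/2)).filter (fun j => ¬ ((2:Int)^j ∈ U))).erase (v2 n)) := by
            ext i; simp only [Finset.mem_insert, Finset.mem_erase]; tauto
          rw [hins, Finset.sum_insert (Finset.notMem_erase _ _)]
        · intro z
          rw [ihm' z]
          simp only [PySem.Set.mem_add, Finset.mem_insert]
          constructor
          · rintro ((hz | rfl) | ⟨j, hj, rfl⟩)
            · exact Or.inl hz
            · exact Or.inr ⟨v2 n, Or.inl rfl, rfl⟩
            · exact Or.inr ⟨j, Or.inr hj, rfl⟩
          · rintro (hz | ⟨j, (rfl | hj), rfl⟩)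
            · exact Or.inl (Or.inl hz)
            · exact Or.inl (Or.inr rfl)
            · exact Or.inr ⟨j, hj, rfl⟩

-- B's _lowbit_exp computes v2.
theorem lowbitExp_natCast (n : Nat) : lowbitExp (n : Int) = (v2 n : Int) := by
  induction n using Nat.strong_induction_on with
  | _ n ih =>
    have hm : PySem.Int.mod (n:Int) 2 = ((n % 2 : Nat) : Int) := by
      exact_mod_cast PySem.Int.mod_natCast n 2
    have hf : PySem.Int.floordiv (n:Int) 2 = ((n / 2 : Nat) : Int) := by
      exact_mod_cast PySem.Int.floordiv_natCast n 2
    rw [lowbitExp]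
    by_cases h0 : n = 0
    · subst h0
      rw [dif_neg (by simp)]
      rw [v2]; norm_num
    · by_cases he : n % 2 = 0
      · rw [dif_pos ⟨by rw [hm, he]; norm_num, by exact_mod_cast h0⟩]
        rw [hf, ih (n/2) (by omega)]
        rw [v2_even (by omega) he]
        push_cast; ring
      · rw [dif_neg]
        · rw [v2_odd (by omega)]; norm_num
        · rw [hm]
          intro ⟨h1, _⟩
          have : n % 2 = 0 := by exact_mod_cast h1
          exact he this

-- B's _depth loop computes dChar.
theorem depthGo_eq (n : Nat) (h : 0 < n) (d : Int) (hd : 0 ≤ d) :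
    depthGo (n : Int) d = max d (dChar n : Int) := by
  induction n using Nat.strong_induction_on generalizing d with
  | _ n ih =>
    rw [depthGo]
    by_cases h1 : 1 < n
    · rw [dif_pos (by exact_mod_cast h1)]
      rw [show PySem.Int.floordiv (n:Int) 2 = ((n / 2 : Nat) : Int) by
            exact_mod_cast PySem.Int.floordiv_natCast n 2,
          lowbitExp_natCast n]
      rw [ih (n/2) (by omega) (by omega) (max d (v2 n : Int)) (by positivity)]
      conv_rhs => rw [dChar, dif_pos h1]
      push_cast
      omega
    · rw [dif_neg (by exact_mod_cast h1)]
      have : n = 1 := by omega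
      subst this
      rw [dChar]; norm_num
      omega

theorem sum_pow_two (m : Nat) : ∑ j ∈ Finset.range m, (2:Int) ^ j = 2 ^ m - 1 := by
  induction m with
  | zero => simp
  | succ m ih => rw [Finset.sum_range_succ, ih]; ring

theorem firstRun (n : Nat) (hn : 0 < n) :
    (applyOperations (n : Int) PySem.Set.empty).1 = 2 ^ (dChar n + 1) - 1
    ∧ ∀ z : Int, z ∈ (applyOperations (n : Int) PySem.Set.empty).2 ↔ ∃ j ≤ dChar n, z = (2:Int) ^ j := by
  obtain ⟨hc, hm⟩ := applyOps_spec n PySem.Set.empty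
  rw [expSet_eq_range n hn] at hc hm
  constructor
  · rw [hc]
    have : (Finset.range (dChar n + 1)).filter (fun j => ¬ ((2:Int) ^ j ∈ PySem.Set.empty)) = Finset.range (dChar n + 1) := by
      apply Finset.filter_true_of_mem
      intro j _
      simp [PySem.Set.empty]
    rw [this, sum_pow_two]
  · intro z
    rw [hm z]
    simp only [PySem.Set.empty, List.not_mem_nil, false_or, Finset.mem_range]
    constructor
    · rintro ⟨j, hj, rfl⟩; exact ⟨j, by omega, rfl⟩
    · rintro ⟨j, hj, rfl⟩; exact ⟨j, by omega, rfl⟩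

theorem secondRun (n : Nat) (hn : 0 < n) (dx : Nat) (S : PySem.Set Int)
    (hS : ∀ z : Int, z ∈ S ↔ ∃ j ≤ dx, z = (2:Int) ^ j) :
    (applyOperations (n : Int) S).1 = 2 ^ (max dx (dChar n) + 1) - 2 ^ (dx + 1) := by
  obtain ⟨hc, _⟩ := applyOps_spec n S
  rw [expSet_eq_range n hn] at hc
  rw [hc]
  have hfil : (Finset.range (dChar n + 1)).filter (fun j => ¬ ((2:Int) ^ j ∈ S))
      = Finset.Ico (dx + 1) (dChar n + 1) := by
    ext j
    simp only [Finset.mem_filter, Finset.mem_range, Finset.mem_Ico, hS]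
    constructor
    · rintro ⟨hj, hnot⟩
      refine ⟨?_, hj⟩
      by_contra hle
      exact hnot ⟨j, by omega, rfl⟩
    · rintro ⟨hgt, hj⟩
      refine ⟨hj, ?_⟩
      rintro ⟨i, hi, heq⟩
      have := pow_two_inj heq
      omega
  rw [hfil]
  by_cases hcase : dx + 1 ≤ dChar n + 1
  · rw [Finset.sum_Ico_eq_sub _ hcase, sum_pow_two, sum_pow_two]
    have : max dx (dChar n) = dChar n := by omega
    rw [this]
    ring
  · rw [Finset.Ico_eq_empty (by omega), Finset.sum_empty]
    have : max dx (dChar n) = dx := by omega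
    rw [this]
    ring

theorem applyOps_zero (U : PySem.Set Int) : applyOperations 0 U = (0, U) := by
  rw [applyOperations, dif_neg (by norm_num)]

theorem depth_natCast (n : Nat) (h : 0 < n) : depth (n : Int) = (dChar n : Int) := by
  rw [depth, if_neg (by exact_mod_cast h.ne'), depthGo_eq n h 0 le_rfl]
  simp

theorem min_cost_eq_of_nonneg (x y : Int) (hx : 0 ≤ x) (hy : 0 ≤ y) :
    min_cost_to_equal x y = min_cost_to_equal_alt x y := by
  by_cases hxy : x = y
  · rw [min_cost_to_equal, min_cost_to_equal_alt, if_pos hxy, if_pos hxy]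
  · obtain ⟨nx, rfl⟩ := Int.eq_ofNat_of_zero_le hx
    obtain ⟨ny, rfl⟩ := Int.eq_ofNat_of_zero_le hy
    rw [min_cost_to_equal, min_cost_to_equal_alt, if_neg hxy, if_neg hxy]
    by_cases hx0 : nx = 0
    · subst hx0
      have hny : 0 < ny := Nat.pos_of_ne_zero (by rintro rfl; exact hxy rfl)
      simp only [Nat.cast_zero, applyOps_zero]
      rw [(firstRun ny hny).1]
      rw [show depth 0 = -1 from by rw [depth, if_pos rfl]]
      rw [depth_natCast ny hny]
      have hmax : (max (-1 : Int) (dChar ny : Int) + 1).toNat = dChar ny + 1 := by omega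
      rw [hmax]
      ring
    · have hnx : 0 < nx := Nat.pos_of_ne_zero hx0
      by_cases hy0 : ny = 0
      · subst hy0
        simp only [Nat.cast_zero, applyOps_zero]
        rw [(firstRun nx hnx).1]
        rw [show depth 0 = -1 from by rw [depth, if_pos rfl]]
        rw [depth_natCast nx hnx]
        have hmax : (max (dChar nx : Int) (-1 : Int) + 1).toNat = dChar nx + 1 := by omega
        rw [hmax]
        ring
      · have hny : 0 < ny := Nat.pos_of_ne_zero hy0
        obtain ⟨hc1, hm1⟩ := firstRun nx hnx
        have hc2 := secondRun ny hny (dChar nx) _ hm1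
        simp only []
        rw [hc1, hc2]
        rw [depth_natCast nx hnx, depth_natCast ny hny]
        have hM : (max (dChar nx : Int) (dChar ny : Int) + 1).toNat
            = max (dChar nx) (dChar ny) + 1 := by omega
        rw [hM]
        ring

-- ===== VERDICT (by name: the statement is the Claim_ definition above) =====
theorem min_cost_to_equal_spec : Claim_equal_min_cost_to_equal := by
  intro x y _ hpre
  unfold Spec_min_cost_to_equal
  rcases hpre with rfl | ⟨hx, hy⟩
  · rw [min_cost_to_equal, min_cost_to_equal_alt, if_pos rfl, if_pos rfl]
  · exact min_cost_eq_of_nonneg x y hx hy
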